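-- pv_equiv track=rewrite | github.com/libka-pl/libka | script.module.kodipl/lib/kodipl/iter.py | neighbor_iter
-- ===== SOURCE A (Python) =====
-- from itertools import tee, zip_longest
--
-- def neighbor_iter(iterable, fillvalue=None):
--     "s -> (None,s0,s1), (s0,s1,s2), ..., (sn-1, sn, None)"
--     a, b, c = tee(iterable, 3)
--     next(c, None)
--     try:
--         yield fillvalue, next(b), next(c, fillvalue)
--     except StopIteration:
--         return
--     while True:
--         try:
--             yield next(a), next(b), next(c, fillvalue)
--         except StopIteration:
--             return
-- ===== SOURCE B (Python) =====
-- def neighbor_iter(iterable, fillvalue=None):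
--     "s -> (None,s0,s1), (s0,s1,s2), ..., (sn-1, sn, None)"
--     it = iter(iterable)
--     try:
--         cur = next(it)
--     except StopIteration:
--         return
--     prev = fillvalue
--     for nxt in it:
--         yield prev, cur, nxt
--         prev, cur = cur, nxt
--     yield prev, cur, fillvalue
-- ===== Notes on version B (the rewrite author's own statement) =====
-- stated objective: simpler
-- what changed: Replaces the three tee'd offset iterators and try/except pumping with a single iterator plus explicit prev/cur window state updated in a plain for loop.
import Mathlib
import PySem

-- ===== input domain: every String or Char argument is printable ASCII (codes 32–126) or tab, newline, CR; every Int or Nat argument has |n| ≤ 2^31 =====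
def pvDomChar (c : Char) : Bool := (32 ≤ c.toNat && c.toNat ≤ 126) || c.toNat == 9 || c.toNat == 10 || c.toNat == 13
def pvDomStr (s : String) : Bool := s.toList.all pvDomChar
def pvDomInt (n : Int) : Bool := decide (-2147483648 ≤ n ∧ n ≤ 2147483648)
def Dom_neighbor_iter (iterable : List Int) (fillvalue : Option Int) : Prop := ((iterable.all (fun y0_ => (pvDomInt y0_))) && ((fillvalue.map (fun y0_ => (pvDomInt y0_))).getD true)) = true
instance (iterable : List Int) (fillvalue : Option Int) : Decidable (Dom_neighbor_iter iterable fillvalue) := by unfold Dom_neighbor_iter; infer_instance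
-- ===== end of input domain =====

-- B replaces A's three tee'd iterators with one pass keeping explicit prev/cur state (simpler decomposition; return values proved equal).

-- ===== PORT A =====
-- the while loop: yield (next(a), next(b), next(c, fillvalue)); a/b/c are the remaining
-- suffixes of the three tee'd iterators (b one ahead of a, c one ahead of b)
def neighborLoopA (fillvalue : Option Int) : List Int → List Int → List Int → List (Option Int × Option Int × Option Int)
  | _, [], _ => []                 -- next(b) raises StopIteration → return
  | [], _ :: _, _ => []            -- unreachable (a is never shorter than b)
  | z :: a', y :: b', c => (some z, some y, match c with | [] => fillvalue | w :: _ => some w) :: neighborLoopA fillvalue a' b' (c.drop 1)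

def neighbor_iter (iterable : List Int) (fillvalue : Option Int) : List (Option Int × Option Int × Option Int) :=
  -- a, b, c = tee(iterable, 3); next(c, None)
  match iterable with
  | [] => []                       -- first next(b) raises → return
  | x :: rest =>
      (fillvalue, some x, match rest with | [] => fillvalue | w :: _ => some w) :: neighborLoopA fillvalue (x :: rest) rest (rest.drop 1)

-- ===== PORT B =====
-- for nxt in it: yield (prev, cur, nxt); prev, cur = cur, nxt  -- then yield (prev, cur, fillvalue)
def neighborLoopB (fillvalue : Option Int) : Option Int → Int → List Int → List (Option Int × Option Int × Option Int)
  | prev, cur, [] => [(prev, some cur, fillvalue)]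
  | prev, cur, nxt :: rest => (prev, some cur, some nxt) :: neighborLoopB fillvalue (some cur) nxt rest

def neighbor_iter_alt (iterable : List Int) (fillvalue : Option Int) : List (Option Int × Option Int × Option Int) :=
  match iterable with
  | [] => []
  | x :: rest => neighborLoopB fillvalue fillvalue x rest

-- ===== PRECONDITION & SPEC =====
def Spec_neighbor_iter (iterable : List Int) (fillvalue : Option Int) (out : List (Option Int × Option Int × Option Int)) : Prop := out = neighbor_iter_alt iterable fillvalue
instance (iterable : List Int) (fillvalue : Option Int) (out : List (Option Int × Option Int × Option Int)) : Decidable (Spec_neighbor_iter iterable fillvalue out) := by unfold Spec_neighbor_iter; infer_instance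

-- ===== CLAIM (what is proved, stated in full; the proofs are below) =====
def Claim_equal_neighbor_iter : Prop := ∀ (iterable : List Int) (fillvalue : Option Int), Dom_neighbor_iter iterable fillvalue → Spec_neighbor_iter iterable fillvalue (neighbor_iter iterable fillvalue)

-- ===== LEMMAS AND PROOFS =====
theorem loopA_eq_loopB (fillvalue : Option Int) (rest : List Int) :
    ∀ (x : Int) (p : Option Int),
      (p, some x, (match rest with | [] => fillvalue | w :: _ => some w)) :: neighborLoopA fillvalue (x :: rest) rest (rest.drop 1) = neighborLoopB fillvalue p x rest := by
  induction rest with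
  | nil => intro x p; simp [neighborLoopA, neighborLoopB]
  | cons y rest' ih =>
      intro x p
      simp only [neighborLoopA, neighborLoopB, List.drop_one]
      rw [← ih y (some x)]
      simp [List.drop_one]

-- ===== VERDICT (by name: the statement is the Claim_ definition above) =====
theorem neighbor_iter_spec : Claim_equal_neighbor_iter := by
  intro iterable fillvalue _
  unfold Spec_neighbor_iter neighbor_iter neighbor_iter_alt
  cases iterable with
  | nil => rfl
  | cons x rest => exact loopA_eq_loopB fillvalue rest x fillvalue
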